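-- pv_equiv track=rewrite | github.com/twkenxtis/DRM_BERRIZ | unit/getall/GetArtisList.py | _extract_media_items
-- ===== SOURCE A (Python) =====
-- from typing import Any, Dict, List, Optional, Tuple, Union, Type
--
-- def _extract_media_items(contents: List[Dict[str, Any]]) -> Tuple[List[Dict[str, Any]], List[Dict[str, Any]]]:
--     CMT_list: List[Dict[str, Any]] = []
--     POST_list: List[Dict[str, Any]] = []
--     for item in contents:
--         match item.get("contentType"):
--             case "CMT":
--                 CMT_list.append(item)
--             case "POST":
--                 POST_list.append(item)
--     return CMT_list, POST_list
-- ===== SOURCE B (Python) =====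
-- def _extract_media_items(contents):
--     def of_type(t):
--         return [item for item in contents if item.get("contentType") == t]
--     return of_type("CMT"), of_type("POST")
-- ===== Notes on version B (the rewrite author's own statement) =====
-- stated objective: simpler
-- what changed: Replaces A's single classifying loop with two branch-filling accumulators by two independent staged filter passes, one per requested content type, with no in-loop branching or accumulator state.
import Mathlib
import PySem

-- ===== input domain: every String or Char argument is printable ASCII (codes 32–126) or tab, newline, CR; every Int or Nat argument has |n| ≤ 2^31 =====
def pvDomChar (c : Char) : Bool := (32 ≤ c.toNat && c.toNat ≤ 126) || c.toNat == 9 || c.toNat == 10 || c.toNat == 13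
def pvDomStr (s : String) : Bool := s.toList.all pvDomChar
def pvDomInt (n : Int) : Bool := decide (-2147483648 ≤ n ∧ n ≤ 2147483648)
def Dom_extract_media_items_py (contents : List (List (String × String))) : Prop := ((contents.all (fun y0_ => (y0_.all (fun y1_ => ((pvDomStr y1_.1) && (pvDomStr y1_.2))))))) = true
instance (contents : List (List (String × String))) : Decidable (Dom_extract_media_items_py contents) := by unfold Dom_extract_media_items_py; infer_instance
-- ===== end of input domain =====

-- B computes each returned list by its own independent filter pass (one per content type),
-- instead of A's single loop that classifies every item into two accumulators (objective: simpler).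


-- item.get("contentType"): first-match lookup in the association list (shared primitive of both Pythons)
def pvGetCT (item : List (String × String)) : Option String :=
  match item with
  | [] => none
  | (k, v) :: rest => if k == "contentType" then some v else pvGetCT rest

-- ===== PORT A =====
def extract_media_items_py (contents : List (List (String × String))) : (List (List (String × String))) × (List (List (String × String))) :=
  contents.foldl
    (fun acc item =>
      if pvGetCT item == some "CMT" then (acc.1 ++ [item], acc.2)
      else if pvGetCT item == some "POST" then (acc.1, acc.2 ++ [item])
      else acc)
    ([], [])

-- ===== PORT B =====
-- of_type(t) = [item for item in contents if item.get("contentType") == t]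
def pvOfType (contents : List (List (String × String))) (t : String) : List (List (String × String)) :=
  contents.filter (fun item => pvGetCT item == some t)

def extract_media_items_py_alt (contents : List (List (String × String))) : (List (List (String × String))) × (List (List (String × String))) :=
  (pvOfType contents "CMT", pvOfType contents "POST")

-- ===== PRECONDITION & SPEC =====
def Spec_extract_media_items_py (contents : List (List (String × String))) (out : (List (List (String × String))) × (List (List (String × String)))) : Prop := out = extract_media_items_py_alt contents
instance (contents : List (List (String × String))) (out : (List (List (String × String))) × (List (List (String × String)))) : Decidable (Spec_extract_media_items_py contents out) := by unfold Spec_extract_media_items_py; infer_instance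

-- ===== CLAIM =====
def Claim_equal_extract_media_items_py : Prop := ∀ (contents : List (List (String × String))), Dom_extract_media_items_py contents → Spec_extract_media_items_py contents (extract_media_items_py contents)

-- ===== LEMMAS AND PROOFS =====

-- A's loop from any accumulator appends the CMT-filtered and POST-filtered suffixes.
lemma foldA_eq (l : List (List (String × String))) (c p : List (List (String × String))) :
    l.foldl
      (fun acc item =>
        if pvGetCT item == some "CMT" then (acc.1 ++ [item], acc.2)
        else if pvGetCT item == some "POST" then (acc.1, acc.2 ++ [item])
        else acc)
      (c, p)
    = (c ++ l.filter (fun it => pvGetCT it == some "CMT"),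
       p ++ l.filter (fun it => pvGetCT it == some "POST")) := by
  induction l generalizing c p with
  | nil => simp
  | cons x xs ih =>
    rw [List.foldl_cons]
    by_cases h1 : pvGetCT x = some "CMT"
    · have hstep : (if pvGetCT x == some "CMT" then ((c, p).1 ++ [x], (c, p).2)
          else if pvGetCT x == some "POST" then ((c, p).1, (c, p).2 ++ [x]) else (c, p)) = (c ++ [x], p) := by
        simp [h1]
      rw [hstep, ih]
      simp [h1]
    · by_cases h2 : pvGetCT x = some "POST"
      · have hstep : (if pvGetCT x == some "CMT" then ((c, p).1 ++ [x], (c, p).2)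
            else if pvGetCT x == some "POST" then ((c, p).1, (c, p).2 ++ [x]) else (c, p)) = (c, p ++ [x]) := by
          simp [h2]
        rw [hstep, ih]
        simp [h2]
      · have hstep : (if pvGetCT x == some "CMT" then ((c, p).1 ++ [x], (c, p).2)
            else if pvGetCT x == some "POST" then ((c, p).1, (c, p).2 ++ [x]) else (c, p)) = (c, p) := by
          simp [h1, h2]
        rw [hstep, ih]
        simp [h1, h2]

-- ===== VERDICT =====
theorem extract_media_items_py_spec : Claim_equal_extract_media_items_py := by
  intro contents _
  unfold Spec_extract_media_items_py extract_media_items_py extract_media_items_py_alt pvOfType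
  rw [foldA_eq]
  simp
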